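-- pv_equiv track=rewrite | github.com/chixcodes/reservation-bot | Reservation_Bot.py | is_cancel_intent
-- ===== SOURCE A (Python) =====
-- def is_cancel_intent(text):
--     t = (text or "").strip().lower()
--     cancel_keywords = [
--         "cancel", "cancellation", "annuler", "annule", "supprimer reservation",
--         "الغاء", "إلغاء", "الغي", "بدي الغي",
--         "bede elghe", "bade elghe", "elghe", "elghi"
--     ]
--     return any(k in t for k in cancel_keywords)
-- ===== SOURCE B (Python) =====
-- def is_cancel_intent(text):
--     t = (text or "").strip().lower()
--     keywords = [
--         "cancel", "cancellation", "annuler", "annule", "supprimer reservation",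
--         "الغاء", "إلغاء", "الغي", "بدي الغي",
--         "bede elghe", "bade elghe", "elghe", "elghi"
--     ]
--     # single left-to-right scan: at each position test whether some keyword starts there
--     for i in range(len(t)):
--         for k in keywords:
--             if t.startswith(k, i):
--                 return True
--     return False
-- ===== Notes on version B (the rewrite author's own statement) =====
-- stated objective: alternative
-- what changed: Replaces A's per-keyword full-text substring searches (one scan of the text for each of the 13 keywords) with a single left-to-right scan over the text that tests at each position whether any keyword starts there.
import Mathlib
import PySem

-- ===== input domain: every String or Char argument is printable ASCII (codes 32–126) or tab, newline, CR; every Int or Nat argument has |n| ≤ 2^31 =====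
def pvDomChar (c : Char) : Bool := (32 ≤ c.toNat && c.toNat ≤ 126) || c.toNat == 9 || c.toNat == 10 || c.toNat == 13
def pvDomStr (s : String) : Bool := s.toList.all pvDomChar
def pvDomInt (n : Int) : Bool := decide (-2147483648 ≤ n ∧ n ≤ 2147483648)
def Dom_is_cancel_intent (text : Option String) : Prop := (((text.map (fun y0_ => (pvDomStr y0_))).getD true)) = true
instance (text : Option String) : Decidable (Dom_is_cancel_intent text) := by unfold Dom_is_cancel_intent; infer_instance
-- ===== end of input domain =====

-- B replaces A's per-keyword substring searches with one left-to-right scan testing keyword prefixes at each position (alternative decomposition, same cost class).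


-- ===== PORT A =====
def is_cancel_intent (text : Option String) : Bool :=
  let t := PySem.Chars.lower (PySem.Chars.strip (text.getD "").toList)
  let cancel_keywords : List (List Char) :=
    ["cancel".toList, "cancellation".toList, "annuler".toList, "annule".toList,
     "supprimer reservation".toList,
     "الغاء".toList, "إلغاء".toList, "الغي".toList, "بدي الغي".toList,
     "bede elghe".toList, "bade elghe".toList, "elghe".toList, "elghi".toList]
  cancel_keywords.any (fun k => PySem.Chars.isIn k t)

-- ===== PORT B =====
def bKeywords : List (List Char) :=
  ["cancel".toList, "cancellation".toList, "annuler".toList, "annule".toList,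
   "supprimer reservation".toList,
   "الغاء".toList, "إلغاء".toList, "الغي".toList, "بدي الغي".toList,
   "bede elghe".toList, "bade elghe".toList, "elghe".toList, "elghi".toList]

-- the scan over positions: at each position test whether some keyword starts there
def bScan : List Char → Bool
  | [] => false
  | c :: r => bKeywords.any (fun k => PySem.Chars.startswith (c :: r) k) || bScan r

def is_cancel_intent_alt (text : Option String) : Bool :=
  bScan (PySem.Chars.lower (PySem.Chars.strip (text.getD "").toList))

-- ===== PRECONDITION & SPEC =====
def Spec_is_cancel_intent (text : Option String) (out : Bool) : Prop := out = is_cancel_intent_alt text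
instance (text : Option String) (out : Bool) : Decidable (Spec_is_cancel_intent text out) := by unfold Spec_is_cancel_intent; infer_instance

-- ===== CLAIM (what is proved, stated in full; the proofs are below) =====
def Claim_equal_is_cancel_intent : Prop := ∀ (text : Option String), Dom_is_cancel_intent text → Spec_is_cancel_intent text (is_cancel_intent text)

-- ===== LEMMAS AND PROOFS =====

lemma bKeywords_ne_nil : ∀ k ∈ bKeywords, k ≠ [] := by decide

lemma bScan_iff (cs : List Char) :
    bScan cs = true ↔ ∃ k ∈ bKeywords, ∃ j, k <+: cs.drop j := by
  induction cs with
  | nil =>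
      constructor
      · intro h; simp [bScan] at h
      · rintro ⟨k, hk, j, hpre⟩
        exact absurd (List.prefix_nil.mp (by simpa using hpre)) (bKeywords_ne_nil k hk)
  | cons c r ih =>
      simp only [bScan, Bool.or_eq_true, List.any_eq_true, PySem.Chars.startswith_iff, ih]
      constructor
      · rintro (⟨k, hk, hpre⟩ | ⟨k, hk, j, hpre⟩)
        · exact ⟨k, hk, 0, by simpa using hpre⟩
        · exact ⟨k, hk, j + 1, by simpa using hpre⟩
      · rintro ⟨k, hk, j, hpre⟩
        cases j with
        | zero => exact Or.inl ⟨k, hk, by simpa using hpre⟩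
        | succ j => exact Or.inr ⟨k, hk, j, by simpa using hpre⟩

-- ===== VERDICT (by name: the statement is the Claim_ definition above) =====
theorem is_cancel_intent_spec : Claim_equal_is_cancel_intent := by
  intro text _
  unfold Spec_is_cancel_intent is_cancel_intent is_cancel_intent_alt
  set t := PySem.Chars.lower (PySem.Chars.strip (text.getD "").toList) with ht
  rw [Bool.eq_iff_iff, bScan_iff]
  simp only [List.any_eq_true]
  constructor
  · rintro ⟨k, hk, hin⟩
    obtain ⟨j, hpre⟩ := (PySem.Chars.exists_prefix_drop_iff_isIn k t).mpr hin
    exact ⟨k, hk, j, hpre⟩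
  · rintro ⟨k, hk, j, hpre⟩
    exact ⟨k, hk, (PySem.Chars.exists_prefix_drop_iff_isIn k t).mp ⟨j, hpre⟩⟩
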